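-- pv_equiv track=rewrite | github.com/RMCV-Rajapaksha/Competitive-Programing-New | Xtreme Encode/Game Of Thrones - II.py | solve
-- ===== SOURCE A (Python) =====
-- MOD = 10**9 + 7
--
-- def solve(s):
--     # Step 1: Calculate the frequency of each character
--     freq = {}
--     for char in s:
--         if char in freq:
--             freq[char] += 1
--         else:
--             freq[char] = 1
--
--     # Step 2: Calculate the factorials up to the length of the string
--     n = len(s)
--     fact = [1] * (n + 1)
--     for i in range(2, n + 1):
--         fact[i] = (fact[i-1] * i) % MOD
--
--     # Step 3: Count half frequencies and find the central element (odd frequency)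
--     half_freq_sum = 0
--     denominator = 1
--     odd_count = 0
--
--     for count in freq.values():
--         half_freq_sum += count // 2
--         denominator = (denominator * fact[count // 2]) % MOD
--         if count % 2 != 0:
--             odd_count += 1
--
--     # Step 4: Calculate the number of palindrome anagrams
--     # Use the formula (half_freq_sum)! / (freq[char1]//2)! * (freq[char2]//2)! * ... * (freq[charN]//2)!
--     numerator = fact[half_freq_sum]
--     result = (numerator * pow(denominator, MOD-2, MOD)) % MOD
--
--     # Return the result modulo 10^9 + 7
--     return result
-- ===== SOURCE B (Python) =====
-- MOD = 10**9 + 7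
--
-- def solve(s):
--     # Count characters.
--     cnt = {}
--     for ch in s:
--         cnt[ch] = cnt.get(ch, 0) + 1
--     # Multiply binomial coefficients C(half+h, h) incrementally instead of
--     # building a global factorial table and one combined inverse.
--     result = 1
--     half = 0
--     for c in cnt.values():
--         h = c // 2
--         num = 1
--         for j in range(1, h + 1):
--             num = num * (half + j) % MOD
--         den = 1
--         for j in range(1, h + 1):
--             den = den * j % MOD
--         result = result * num % MOD * pow(den, MOD - 2, MOD) % MOD
--         half += h
--     return result % MOD
-- ===== Notes on version B (the rewrite author's own statement) =====
-- stated objective: alternative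
-- what changed: B computes the multinomial as an incremental product of binomial coefficients C(half+h, h) (per-character rising-numerator and h! loops, each with its own modular inverse) instead of A's precomputed factorial table fact[0..n] and single combined inverse, and drops the unused odd-count bookkeeping.
import Mathlib
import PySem

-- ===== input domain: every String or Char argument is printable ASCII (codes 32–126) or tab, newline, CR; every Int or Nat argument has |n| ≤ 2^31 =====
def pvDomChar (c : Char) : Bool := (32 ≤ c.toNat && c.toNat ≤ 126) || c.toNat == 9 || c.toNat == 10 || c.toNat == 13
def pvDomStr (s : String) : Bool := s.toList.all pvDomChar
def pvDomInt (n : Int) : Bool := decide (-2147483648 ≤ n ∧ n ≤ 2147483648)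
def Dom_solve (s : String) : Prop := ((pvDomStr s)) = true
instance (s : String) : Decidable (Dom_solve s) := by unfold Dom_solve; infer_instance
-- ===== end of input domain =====

-- B multiplies binomial coefficients C(half+h, h) incrementally (per-character numerator/denominator
-- loops with a per-step modular inverse) instead of A's global factorial table and one combined
-- inverse, and omits A's unused odd-count bookkeeping ('alternative': similar cost, no speed claim).

-- ===== PORT A =====
def solve (s : String) : Int :=
  -- freq = {}; for char in s: if char in freq: freq[char] += 1 else: freq[char] = 1
  let freq := s.toList.foldl
    (fun (d : PySem.Dict Char Int) c =>
      if d.contains c then d.modify c 0 (· + 1) else d.insert c 1)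
    PySem.Dict.empty
  -- n = len(s); fact = [1]*(n+1); for i in range(2, n+1): fact[i] = (fact[i-1]*i) % MOD
  let n : Int := PySem.Str.len s
  -- n ≥ 0, and every loop index i satisfies 2 ≤ i ≤ n, so .toNat is exact and fact[i-1]/fact[i] are in range
  let fact : List Int :=
    (PySem.List.pyRange 2 (n + 1)).foldl
      (fun f i => f.set i.toNat (PySem.Int.mod (PySem.List.pyGetD f (i - 1) 0 * i) 1000000007))
      (List.replicate (n.toNat + 1) (1 : Int))
  -- half_freq_sum = 0; denominator = 1; odd_count = 0; for count in freq.values(): …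
  let st := freq.values.foldl
    (fun (st : Int × Int × Int) count =>
      (st.1 + PySem.Int.floordiv count 2,
       PySem.Int.mod (st.2.1 * PySem.List.pyGetD fact (PySem.Int.floordiv count 2) 0) 1000000007,
       if PySem.Int.mod count 2 ≠ 0 then st.2.2 + 1 else st.2.2))
    (0, 1, 0)
  -- numerator = fact[half_freq_sum]; result = (numerator * pow(denominator, MOD-2, MOD)) % MOD
  -- (half_freq_sum ≤ n, so the index is in range)
  let numerator := PySem.List.pyGetD fact st.1 0
  PySem.Int.mod (numerator * PySem.Int.powMod st.2.1 1000000005 1000000007) 1000000007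

-- ===== PORT B =====
def solve_alt (s : String) : Int :=
  -- cnt = {}; for ch in s: cnt[ch] = cnt.get(ch, 0) + 1
  let cnt := s.toList.foldl
    (fun (d : PySem.Dict Char Int) c => d.insert c (d.getD c 0 + 1))
    PySem.Dict.empty
  -- result = 1; half = 0; for c in cnt.values(): …
  let st := cnt.values.foldl
    (fun (st : Int × Int) c =>
      let h := PySem.Int.floordiv c 2
      let num := (PySem.List.pyRange 1 (h + 1)).foldl
        (fun r j => PySem.Int.mod (r * (st.2 + j)) 1000000007) 1
      let den := (PySem.List.pyRange 1 (h + 1)).foldl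
        (fun r j => PySem.Int.mod (r * j) 1000000007) 1
      (PySem.Int.mod (PySem.Int.mod (st.1 * num) 1000000007 *
         PySem.Int.powMod den 1000000005 1000000007) 1000000007,
       st.2 + h))
    (1, 0)
  PySem.Int.mod st.1 1000000007

-- ===== PRECONDITION & SPEC =====
def Spec_solve (s : String) (out : Int) : Prop := out = solve_alt s
instance (s : String) (out : Int) : Decidable (Spec_solve s out) := by unfold Spec_solve; infer_instance

-- ===== CLAIM (what is proved, stated in full; the proofs are below) =====
def Claim_equal_solve : Prop := ∀ (s : String), Dom_solve s → Spec_solve s (solve s)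

-- ===== LEMMAS AND PROOFS =====

theorem castmod (a : Int) :
    ((PySem.Int.mod a 1000000007 : Int) : ZMod 1000000007) = (a : ZMod 1000000007) := by
  rw [PySem.Int.mod_eq_emod_of_pos (by norm_num)]
  have := ZMod.intCast_mod a 1000000007
  norm_num at this ⊢
  exact this

theorem castinj {a b : Int}
    (ha0 : 0 ≤ a) (ha1 : a < 1000000007) (hb0 : 0 ≤ b) (hb1 : b < 1000000007)
    (h : (a : ZMod 1000000007) = (b : ZMod 1000000007)) : a = b := by
  rw [ZMod.intCast_eq_intCast_iff] at h
  obtain ⟨k, hk⟩ := h.dvd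
  omega

theorem cast_powMod (b : Int) (e : Nat) :
    ((PySem.Int.powMod b e 1000000007 : Int) : ZMod 1000000007)
      = (b : ZMod 1000000007) ^ e := by
  unfold PySem.Int.powMod
  rw [castmod]; push_cast; ring

def fmod : Nat → Int
  | 0 => 1
  | (k+1) => PySem.Int.mod (fmod k * ((k : Int) + 1)) 1000000007

theorem cast_fmod (k : Nat) :
    ((fmod k : Int) : ZMod 1000000007) = ((k.factorial : Nat) : ZMod 1000000007) := by
  induction k with
  | zero => simp [fmod, Nat.factorial]
  | succ k ih =>
      rw [fmod, castmod, Nat.factorial_succ]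
      push_cast
      rw [ih]; ring

theorem asc_split (a h s : Nat) :
    (a+1).ascFactorial h * (a+h+1).ascFactorial s = (a+1).ascFactorial (h+s) := by
  have h1 := Nat.factorial_mul_ascFactorial a h
  have h2 := Nat.factorial_mul_ascFactorial (a+h) s
  have h3 := Nat.factorial_mul_ascFactorial a (h+s)
  apply Nat.eq_of_mul_eq_mul_left (Nat.factorial_pos a)
  calc a.factorial * ((a+1).ascFactorial h * (a+h+1).ascFactorial s)
      = (a.factorial * (a+1).ascFactorial h) * (a+h+1).ascFactorial s := by ring
    _ = (a+h).factorial * (a+h+1).ascFactorial s := by rw [h1]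
    _ = (a+h+s).factorial := by rw [h2]
    _ = a.factorial * (a+1).ascFactorial (h+s) := by rw [h3, Nat.add_assoc]

theorem numloop (hn a : Nat) (r0 : Int) :
    (((PySem.List.pyRange 1 ((hn : Int) + 1)).foldl
        (fun r j => PySem.Int.mod (r * ((a : Int) + j)) 1000000007) r0 : Int)
      : ZMod 1000000007)
    = (r0 : ZMod 1000000007) * (((a+1).ascFactorial hn : Nat) : ZMod 1000000007) := by
  induction hn with
  | zero =>
      rw [show ((0:Nat):Int) + 1 = 1 from by norm_num,
         show PySem.List.pyRange 1 1 = [] from by decide]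
      simp [Nat.ascFactorial]
  | succ k ih =>
      have hr : ((k+1 : Nat) : Int) + 1 = (((k:Int) + 1) + 1) := by push_cast; ring
      rw [hr, PySem.List.pyRange_one_succ_right (by omega), List.foldl_append]
      simp only [List.foldl_cons, List.foldl_nil]
      rw [castmod]
      push_cast
      rw [ih, Nat.ascFactorial_succ]
      push_cast
      ring

theorem denloop (hn : Nat) (r0 : Int) :
    (((PySem.List.pyRange 1 ((hn : Int) + 1)).foldl
        (fun r j => PySem.Int.mod (r * j) 1000000007) r0 : Int)
      : ZMod 1000000007)
    = (r0 : ZMod 1000000007) * ((hn.factorial : Nat) : ZMod 1000000007) := by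
  induction hn with
  | zero =>
      rw [show ((0:Nat):Int) + 1 = 1 from by norm_num,
         show PySem.List.pyRange 1 1 = [] from by decide]
      simp [Nat.factorial]
  | succ k ih =>
      have hr : ((k+1 : Nat) : Int) + 1 = (((k:Int) + 1) + 1) := by push_cast; ring
      rw [hr, PySem.List.pyRange_one_succ_right (by omega), List.foldl_append]
      simp only [List.foldl_cons, List.foldl_nil]
      rw [castmod]
      push_cast
      rw [ih, Nat.factorial_succ]
      push_cast
      ring

theorem getD_set (l : List Int) (i j : Nat) (a : Int) (hj : j < l.length) :
    (l.set i a).getD j 0 = if i = j then a else l.getD j 0 := by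
  simp only [List.getD_eq_getElem?_getD, List.getElem?_set]
  split_ifs with h1 h2 <;> simp_all

theorem tblAux (nn : Nat) : ∀ (b : Nat), b ≤ nn + 1 →
    (((PySem.List.pyRange 2 (b : Int)).foldl
        (fun f i => f.set i.toNat
          (PySem.Int.mod (PySem.List.pyGetD f (i - 1) 0 * i) 1000000007))
        (List.replicate (nn+1) (1 : Int))).length = nn + 1)
    ∧ (∀ k, k < nn + 1 →
        ((PySem.List.pyRange 2 (b : Int)).foldl
          (fun f i => f.set i.toNat
            (PySem.Int.mod (PySem.List.pyGetD f (i - 1) 0 * i) 1000000007))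
          (List.replicate (nn+1) (1 : Int))).getD k 0
        = if 2 ≤ k ∧ k < b then fmod k else 1) := by
  intro b
  induction b with
  | zero =>
      intro _
      rw [show ((0:Nat):Int) = 0 from rfl, show PySem.List.pyRange 2 0 = [] from by decide]
      constructor
      · simp
      · intro k hk
        rw [List.foldl_nil, if_neg (by omega), List.getD_replicate _ hk]
  | succ b ih =>
      intro hb
      rcases Nat.lt_or_ge b 2 with hb2 | hb2
      · interval_cases b
        · rw [show ((1:Nat):Int) = 1 from rfl, show PySem.List.pyRange 2 1 = [] from by decide]
          refine ⟨by simp, fun k hk => ?_⟩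
          rw [List.foldl_nil, if_neg (by omega), List.getD_replicate _ hk]
        · rw [show ((2:Nat):Int) = 2 from rfl, show PySem.List.pyRange 2 2 = [] from by decide]
          refine ⟨by simp, fun k hk => ?_⟩
          rw [List.foldl_nil, if_neg (by omega), List.getD_replicate _ hk]
      · obtain ⟨ihlen, ihval⟩ := ih (by omega)
        have hsplit : PySem.List.pyRange 2 ((b+1 : Nat) : Int)
            = PySem.List.pyRange 2 (b : Int) ++ [(b : Int)] := by
          rw [show ((b+1 : Nat) : Int) = (b : Int) + 1 from by push_cast; ring]
          exact PySem.List.pyRange_one_succ_right (by exact_mod_cast hb2.le.trans (by omega))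
        rw [hsplit, List.foldl_append]
        simp only [List.foldl_cons, List.foldl_nil]
        set F := (PySem.List.pyRange 2 (b : Int)).foldl
          (fun f i => f.set i.toNat
            (PySem.Int.mod (PySem.List.pyGetD f (i - 1) 0 * i) 1000000007))
          (List.replicate (nn+1) (1 : Int)) with hF
        have hget : PySem.List.pyGetD F ((b : Int) - 1) 0 = fmod (b - 1) := by
          rw [show (b : Int) - 1 = ((b - 1 : Nat) : Int) from by omega,
              PySem.List.pyGetD_of_nonneg F _ (by positivity), Int.toNat_natCast]
          rw [ihval (b-1) (by omega)]
          by_cases hb3 : 3 ≤ b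
          · rw [if_pos (by omega)]
          · rw [if_neg (by omega), show b - 1 = 1 from by omega]
            decide
        have hnew : PySem.Int.mod (PySem.List.pyGetD F ((b : Int) - 1) 0 * (b : Int)) 1000000007
            = fmod b := by
          rw [hget, show b = (b-1) + 1 from by omega, fmod]
          congr 1
        constructor
        · rw [List.length_set, ihlen]
        · intro k hk
          rw [show ((b:Int)).toNat = b from Int.toNat_natCast b, hnew,
              getD_set _ _ _ _ (by omega)]
          by_cases hkb : b = k
          · rw [if_pos hkb, if_pos (by omega), ← hkb]
          · rw [if_neg hkb, ihval k hk]
            by_cases h2 : 2 ≤ k ∧ k < b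
            · rw [if_pos h2, if_pos (by omega)]
            · rw [if_neg h2, if_neg (by omega)]

theorem tbl_lookup (nn : Nat) (k : Nat) (hk : k ≤ nn) :
    PySem.List.pyGetD
      ((PySem.List.pyRange 2 ((nn : Int) + 1)).foldl
        (fun f i => f.set i.toNat
          (PySem.Int.mod (PySem.List.pyGetD f (i - 1) 0 * i) 1000000007))
        (List.replicate (nn+1) (1 : Int))) (k : Int) 0 = fmod k := by
  obtain ⟨hlen, hval⟩ := tblAux nn (nn+1) le_rfl
  rw [show ((nn : Int) + 1) = ((nn + 1 : Nat) : Int) from by push_cast; ring] at *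
  rw [PySem.List.pyGetD_of_nonneg _ _ (by positivity), Int.toNat_natCast]
  rw [hval k (by omega)]
  by_cases h2 : 2 ≤ k
  · rw [if_pos (by omega)]
  · rw [if_neg (by omega)]
    interval_cases k <;> decide

theorem prodpow (ns : List Nat) (e : Nat) :
    ((ns.map (fun m => (((m / 2).factorial : Nat) : ZMod 1000000007))).prod) ^ e
      = (ns.map (fun m => (((m / 2).factorial : Nat) : ZMod 1000000007) ^ e)).prod := by
  induction ns with
  | nil => simp
  | cons m t ih => simp [mul_pow, ih]

theorem dict_step (d : PySem.Dict Char Int) (c : Char) :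
    (if d.contains c then d.modify c 0 (· + 1) else d.insert c 1)
      = d.insert c (d.getD c 0 + 1) := by
  by_cases h : d.contains c
  · rw [if_pos h]; rfl
  · rw [if_neg h, PySem.Dict.getD_of_not_contains _ _ (by simpa using h)]
    norm_num

theorem A_fold (T : List Int) (nn : Nat)
    (hT : ∀ k, k ≤ nn → PySem.List.pyGetD T (k : Int) 0 = fmod k)
    (ns : List Nat) (hbd : ∀ m ∈ ns, m ≤ nn) : ∀ (t0 d0 o0 : Int),
    (ns.foldl
      (fun (st : Int × Int × Int) (m : Nat) =>
        (st.1 + PySem.Int.floordiv (m : Int) 2,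
         PySem.Int.mod (st.2.1 * PySem.List.pyGetD T (PySem.Int.floordiv (m : Int) 2) 0) 1000000007,
         if PySem.Int.mod (m : Int) 2 ≠ 0 then st.2.2 + 1 else st.2.2))
      (t0, d0, o0)).1 = t0 + (((ns.map (· / 2)).sum : Nat) : Int)
    ∧ (((ns.foldl
      (fun (st : Int × Int × Int) (m : Nat) =>
        (st.1 + PySem.Int.floordiv (m : Int) 2,
         PySem.Int.mod (st.2.1 * PySem.List.pyGetD T (PySem.Int.floordiv (m : Int) 2) 0) 1000000007,
         if PySem.Int.mod (m : Int) 2 ≠ 0 then st.2.2 + 1 else st.2.2))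
      (t0, d0, o0)).2.1 : Int) : ZMod 1000000007)
      = (d0 : ZMod 1000000007)
        * (ns.map (fun m => (((m / 2).factorial : Nat) : ZMod 1000000007))).prod := by
  induction ns with
  | nil => intro t0 d0 o0; simp
  | cons m t ih =>
      intro t0 d0 o0
      have hfd : PySem.Int.floordiv ((m : Nat) : Int) 2 = ((m / 2 : Nat) : Int) := by
        exact_mod_cast PySem.Int.floordiv_natCast m 2
      simp only [List.map_cons, List.foldl_cons]
      rw [hfd, hT (m / 2) ((Nat.div_le_self m 2).trans (hbd m (by simp)))]
      have ih' := ih (fun x hx => hbd x (by simp [hx]))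
      refine ⟨?_, ?_⟩
      · rw [(ih' _ _ _).1]
        simp only [List.sum_cons]
        push_cast
        ring
      · rw [(ih' _ _ _).2, castmod]
        simp only [List.prod_cons]
        push_cast [cast_fmod]
        ring

theorem B_fold (ns : List Nat) : ∀ (a : Nat) (r0 : Int),
    (((ns.foldl
      (fun (st : Int × Int) (m : Nat) =>
        (PySem.Int.mod (PySem.Int.mod (st.1 *
           (PySem.List.pyRange 1 (PySem.Int.floordiv (m : Int) 2 + 1)).foldl
             (fun r j => PySem.Int.mod (r * (st.2 + j)) 1000000007) 1) 1000000007 *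
           PySem.Int.powMod
             ((PySem.List.pyRange 1 (PySem.Int.floordiv (m : Int) 2 + 1)).foldl
               (fun r j => PySem.Int.mod (r * j) 1000000007) 1)
             1000000005 1000000007) 1000000007,
         st.2 + PySem.Int.floordiv (m : Int) 2))
      (r0, (a : Int))).1 : Int) : ZMod 1000000007)
    = (r0 : ZMod 1000000007)
      * (((a + 1).ascFactorial ((ns.map (· / 2)).sum) : Nat) : ZMod 1000000007)
      * (ns.map (fun m => (((m / 2).factorial : Nat) : ZMod 1000000007) ^ 1000000005)).prod := by
  induction ns with
  | nil => intro a r0; simp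
  | cons m t ih =>
      intro a r0
      have hfd : PySem.Int.floordiv ((m : Nat) : Int) 2 = ((m / 2 : Nat) : Int) := by
        exact_mod_cast PySem.Int.floordiv_natCast m 2
      simp only [List.map_cons, List.foldl_cons, hfd]
      rw [show (a : Int) + ((m / 2 : Nat) : Int) = ((a + m / 2 : Nat) : Int) from by push_cast; ring]
      rw [ih (a + m / 2) _]
      simp only [Int.cast_mul, castmod, cast_powMod]
      rw [denloop, numloop, List.sum_cons, List.prod_cons,
          ← asc_split a (m / 2) ((List.map (fun x => x / 2) t).sum), Nat.cast_mul]
      ring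

theorem counter_values (xs : List Char) :
    (PySem.Dict.counter xs).values
      = ((PySem.Set.ofList xs).map (fun k => xs.count k)).map (fun m : Nat => (m : Int)) := by
  have h : (PySem.Dict.counter xs).values = (PySem.Dict.counter xs).items.map (·.2) := rfl
  rw [h, PySem.Dict.items_counter, List.map_map, List.map_map]
  rfl

theorem counts_sum (xs : List Char) :
    ((PySem.Set.ofList xs).map (fun k => xs.count k)).sum = xs.length := by
  have hp : (PySem.Set.ofList xs : List Char).Perm xs.dedup :=
    (List.perm_ext_iff_of_nodup (PySem.Set.nodup_ofList xs) xs.nodup_dedup).2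
      (fun a => by rw [PySem.Set.mem_ofList, List.mem_dedup])
  rw [(hp.map (fun k => xs.count k)).sum_eq]
  exact List.sum_map_count_dedup_eq_length xs

theorem solve_eq_alt (s : String) : solve s = solve_alt s := by
  simp only [solve, solve_alt]
  rw [show (fun (d : PySem.Dict Char Int) (c : Char) =>
        if d.contains c then d.modify c 0 (· + 1) else d.insert c 1)
      = (fun (d : PySem.Dict Char Int) (c : Char) => d.insert c (d.getD c 0 + 1)) from
        funext fun d => funext fun c => dict_step d c]
  rw [PySem.Dict.foldl_insert_getD_add_one_eq_counter, counter_values, PySem.Str.len_eq,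
      Int.toNat_natCast]
  set cs := (PySem.Set.ofList s.toList).map (fun k => s.toList.count k) with hcs
  simp only [List.foldl_map]
  have hbd : ∀ m ∈ cs, m ≤ s.toList.length := by
    rw [hcs]
    intro m hm
    obtain ⟨k, -, rfl⟩ := List.mem_map.1 hm
    exact List.count_le_length
  have hT := fun k hk => tbl_lookup s.toList.length k hk
  have HA := A_fold _ s.toList.length hT cs hbd 0 1 0
  have HB := B_fold cs 0 1
  rw [Nat.cast_zero, Nat.zero_add] at HB
  have hS : ((cs.map (· / 2)).sum) ≤ s.toList.length := by
    calc ((cs.map (· / 2)).sum)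
        ≤ ((cs.map (fun x => x)).sum) :=
          List.sum_le_sum (fun i _ => Nat.div_le_self i 2)
      _ = _ := by rw [List.map_id', hcs]; exact counts_sum s.toList
  apply castinj (PySem.Int.mod_nonneg _ (by norm_num)) (PySem.Int.mod_lt _ (by norm_num))
    (PySem.Int.mod_nonneg _ (by norm_num)) (PySem.Int.mod_lt _ (by norm_num))
  rw [castmod, castmod, Int.cast_mul, cast_powMod, HA.1, zero_add, hT _ hS, cast_fmod, HA.2,
      HB, Nat.one_ascFactorial, Int.cast_one, one_mul, one_mul, prodpow]

-- ===== VERDICT (by name: the statement is the Claim_ definition above) =====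
theorem solve_spec : Claim_equal_solve := by
  intro s _
  exact solve_eq_alt s
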